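-- pv_equiv track=rewrite | github.com/KadakWNL/Tern | A1m/specific_data_main.py | find_highest_scoring_chapter
-- ===== SOURCE A (Python) =====
-- def find_highest_scoring_chapter(student_avg_list):
--     highest_scores = {}
--
--     for student_data in student_avg_list:  # Loop through the list of dicts
--         for roll, subject_data in student_data.items():
--             max_marks = -1  # Track max marks
--             max_chapters = []  # Store all chapters with max marks
--
--             for subject, chapters in subject_data.items():
--                 for chapter, marks in chapters.items():
--                     if marks > max_marks:
--                         max_marks = marks
--                         max_chapters = [chapter]  # Reset list with new max
--                     elif marks == max_marks:
--                         max_chapters.append(chapter)  # Add if it's also max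
--
--             # Store as "count-max_marks": [list of chapters]
--             key = f"{len(max_chapters)}-{max_marks}"
--             highest_scores[roll] = {key: max_chapters}
--
--     return highest_scores
-- ===== SOURCE B (Python) =====
-- def find_highest_scoring_chapter(student_avg_list):
--     def summary(subject_data):
--         best = max([-1] + [m for ch in subject_data.values() for m in ch.values()])
--         winners = [c for ch in subject_data.values() for c, m in ch.items() if m == best]
--         return {f"{len(winners)}-{best}": winners}
--
--     entries = [(roll, sd) for student_data in student_avg_list
--                for roll, sd in student_data.items()]
--     return {roll: summary(sd) for roll, sd in entries}
-- ===== Notes on version B (the rewrite author's own statement) =====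
-- stated objective: idiomatic
-- what changed: Replaces A's nested loops with running-max/reset/append-on-tie state by a staged decomposition: flatten all (roll, subject_data) entries once, and per roll compute the max mark (with a -1 floor) in one comprehension and the tied chapters by a second filtering comprehension, building the result as a dict comprehension.
import Mathlib
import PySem

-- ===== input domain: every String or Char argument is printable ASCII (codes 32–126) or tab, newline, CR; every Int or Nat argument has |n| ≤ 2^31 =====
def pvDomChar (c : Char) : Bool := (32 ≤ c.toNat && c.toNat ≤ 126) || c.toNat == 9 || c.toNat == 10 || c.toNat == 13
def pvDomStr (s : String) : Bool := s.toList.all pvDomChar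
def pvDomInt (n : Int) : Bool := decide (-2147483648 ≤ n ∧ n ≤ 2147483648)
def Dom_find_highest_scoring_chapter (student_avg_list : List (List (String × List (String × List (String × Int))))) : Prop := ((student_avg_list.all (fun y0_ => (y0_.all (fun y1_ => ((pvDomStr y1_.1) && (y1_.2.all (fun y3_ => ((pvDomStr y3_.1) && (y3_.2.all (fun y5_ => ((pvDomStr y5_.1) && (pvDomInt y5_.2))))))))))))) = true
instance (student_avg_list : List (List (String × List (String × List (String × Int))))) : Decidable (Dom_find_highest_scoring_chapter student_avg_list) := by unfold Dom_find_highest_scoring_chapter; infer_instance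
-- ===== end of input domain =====

-- B replaces A's running-max/reset/append-on-tie loop state by a staged decomposition (flatten the roll entries once; per roll, max with a -1 floor in one pass, then filter the tied chapters); objective: idiomatic.


-- ===== PORT A =====
-- running max / reset-on-new-max / append-on-tie, transliterating A's innermost loop body
def fhscStepA (st : Int × List String) (p : String × Int) : Int × List String :=
  if p.2 > st.1 then (p.2, [p.1])
  else if p.2 = st.1 then (st.1, st.2 ++ [p.1])
  else st

-- A's per-roll body: the nested subject/chapter loops over the running state, then the key insert
def fhscRollA (hs : PySem.Dict String (List (String × List String)))
    (rp : String × List (String × List (String × Int))) :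
    PySem.Dict String (List (String × List String)) :=
  let st := rp.2.foldl (fun st sc => sc.2.foldl fhscStepA st) ((-1 : Int), ([] : List String))
  let key := PySem.Int.toStr (st.2.length : Int) ++ "-" ++ PySem.Int.toStr st.1
  hs.insert rp.1 [(key, st.2)]

def find_highest_scoring_chapter (student_avg_list : List (List (String × List (String × List (String × Int))))) : List (String × List (String × List String)) :=
  (student_avg_list.foldl (fun hs student_data => student_data.foldl fhscRollA hs) PySem.Dict.empty).items

-- ===== PORT B =====
-- B's summary(subject_data): max of all marks with a -1 floor, then the comprehension of tied chapters
def fhscSummary (sd : List (String × List (String × Int))) : List (String × List String) :=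
  let best := (PySem.List.max? ((-1 : Int) :: sd.flatMap (fun ch => ch.2.map Prod.snd)) (fun y => y)).getD (-1)
  let winners := sd.flatMap (fun ch => (ch.2.filter (fun p => p.2 = best)).map Prod.fst)
  [(PySem.Int.toStr (winners.length : Int) ++ "-" ++ PySem.Int.toStr best, winners)]

def find_highest_scoring_chapter_alt (student_avg_list : List (List (String × List (String × List (String × Int))))) : List (String × List (String × List String)) :=
  let entries := student_avg_list.flatMap (fun student_data => student_data)
  (entries.foldl (fun d rp => d.insert rp.1 (fhscSummary rp.2)) PySem.Dict.empty).items

-- ===== PRECONDITION & SPEC =====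
def Spec_find_highest_scoring_chapter (student_avg_list : List (List (String × List (String × List (String × Int))))) (out : List (String × List (String × List String))) : Prop := out = find_highest_scoring_chapter_alt student_avg_list
instance (student_avg_list : List (List (String × List (String × List (String × Int))))) (out : List (String × List (String × List String))) : Decidable (Spec_find_highest_scoring_chapter student_avg_list out) := by unfold Spec_find_highest_scoring_chapter; infer_instance

-- ===== CLAIM (what is proved, stated in full; the proofs are below) =====
def Claim_equal_find_highest_scoring_chapter : Prop := ∀ (student_avg_list : List (List (String × List (String × List (String × Int))))), Dom_find_highest_scoring_chapter student_avg_list → Spec_find_highest_scoring_chapter student_avg_list (find_highest_scoring_chapter student_avg_list)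

-- ===== LEMMAS AND PROOFS =====

lemma le_fold_max (l : List Int) (a : Int) : a ≤ l.foldl max a := by
  induction l generalizing a with
  | nil => simp
  | cons x t ih => exact le_trans (le_max_left a x) (ih (max a x))

-- the running-max loop equals max-then-filter, with a prefix kept only when no new max appears
lemma fhsc_inv (p : List (String × Int)) (mm : Int) (mc : List String) :
    p.foldl fhscStepA (mm, mc) =
      ((p.map Prod.snd).foldl max mm,
       (if (p.map Prod.snd).foldl max mm = mm then mc else []) ++
         (p.filter (fun q => q.2 = (p.map Prod.snd).foldl max mm)).map Prod.fst) := by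
  induction p generalizing mm mc with
  | nil => simp
  | cons h t ih =>
    obtain ⟨c, m⟩ := h
    have hM : max mm m ≤ (t.map Prod.snd).foldl max (max mm m) := le_fold_max _ _
    simp only [List.foldl_cons, List.map_cons, List.filter_cons]
    by_cases h1 : m > mm
    · rw [show fhscStepA (mm, mc) (c, m) = (m, [c]) by simp [fhscStepA, h1], ih]
      have hmm : max mm m = m := max_eq_right (le_of_lt h1)
      simp only [hmm] at hM ⊢
      have hne : (t.map Prod.snd).foldl max m ≠ mm := by omega
      by_cases h2 : (t.map Prod.snd).foldl max m = m
      · simp [h2]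
        omega
      · have : ¬ (m = (t.map Prod.snd).foldl max m) := fun h => h2 h.symm
        simp [h2, hne, this]
    · have hmm : max mm m = mm := max_eq_left (by omega)
      rw [hmm] at hM
      by_cases h2 : m = mm
      · rw [show fhscStepA (mm, mc) (c, m) = (mm, mc ++ [c]) by simp [fhscStepA, h2], ih]
        simp only [hmm]
        by_cases h3 : (t.map Prod.snd).foldl max mm = mm
        · have : m = (t.map Prod.snd).foldl max mm := by omega
          simp [h3, this]
        · have : ¬ (m = (t.map Prod.snd).foldl max mm) := by omega
          simp [h3, this]
      · rw [show fhscStepA (mm, mc) (c, m) = (mm, mc) by simp [fhscStepA, h1, h2], ih]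
        simp only [hmm]
        have hlt : m < mm := by omega
        have : ¬ (m = (t.map Prod.snd).foldl max mm) := by omega
        simp [this]

-- a filter distributes over flatMap
lemma filter_flatMap {α β : Type} (l : List α) (f : α → List β) (q : β → Bool) :
    (l.flatMap f).filter q = l.flatMap (fun x => (f x).filter q) := by
  induction l with
  | nil => rfl
  | cons h t ih => simp [List.flatMap_cons, List.filter_append, ih]

-- A's per-roll loop produces exactly B's summary pair
lemma roll_state_eq (sd : List (String × List (String × Int))) :
    sd.foldl (fun st sc => sc.2.foldl fhscStepA st) ((-1 : Int), ([] : List String)) =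
      ((PySem.List.max? ((-1 : Int) :: sd.flatMap (fun ch => ch.2.map Prod.snd)) (fun y => y)).getD (-1),
       sd.flatMap (fun ch =>
         (ch.2.filter (fun p => p.2 = (PySem.List.max? ((-1 : Int) :: sd.flatMap (fun ch => ch.2.map Prod.snd)) (fun y => y)).getD (-1))).map Prod.fst)) := by
  have hp : sd.foldl (fun st sc => sc.2.foldl fhscStepA st) ((-1 : Int), ([] : List String))
      = (sd.flatMap (fun sc => sc.2)).foldl fhscStepA ((-1 : Int), ([] : List String)) := by
    rw [List.foldl_flatMap]
  have hmarks : sd.flatMap (fun ch => ch.2.map Prod.snd) = (sd.flatMap (fun sc => sc.2)).map Prod.snd := by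
    simp [List.map_flatMap]
  have hbest : (PySem.List.max? ((-1 : Int) :: sd.flatMap (fun ch => ch.2.map Prod.snd)) (fun y => y)).getD (-1)
      = ((sd.flatMap (fun sc => sc.2)).map Prod.snd).foldl max (-1) := by
    rw [hmarks, PySem.List.max?_id_cons]; rfl
  rw [hp, fhsc_inv, hbest]
  refine Prod.ext rfl ?_
  simp only [filter_flatMap, List.map_flatMap]
  split_ifs <;> simp

lemma fhsc_roll_eq : fhscRollA = (fun d rp => d.insert rp.1 (fhscSummary rp.2)) := by
  funext hs rp
  simp only [fhscRollA, fhscSummary, roll_state_eq]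

-- ===== VERDICT (by name: the statement is the Claim_ definition above) =====
theorem find_highest_scoring_chapter_spec : Claim_equal_find_highest_scoring_chapter := by
  intro l _
  unfold Spec_find_highest_scoring_chapter find_highest_scoring_chapter find_highest_scoring_chapter_alt
  rw [fhsc_roll_eq, ← List.foldl_flatMap]
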